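-- pv_equiv track=rewrite | github.com/Gheavenfl/2017A2CS | Chapter25/recursion2.py | Splitodd10
-- ===== SOURCE A (Python) =====
-- def Splitodd10(X):
--     a=len(X)
--     if a==1:
--         if X[0]==10 or X[0]%2==1:
--             return True
--         else:
--             return False
--     if a==2 and X[-1]%10==0 and X[-2]%2==1:
--         return True
--     if a==2 and X[-2]%10==0 and X[-1]%2==1:
--         return True
--     if a==2 and X[-1]%10==0 and X[-2]&2!=1:
--         return False
--     if a==2 and X[-2]%10==0 and X[-1]&2!=1:
--         return False
--     else:
--         return Splitodd10(X[:-2]+[X[-1]+X[-2]]) or Splitodd10([X[0]+X[1]]+X[2:]) or Splitodd10([X[0]+X[-1]]+X[1:-1]) or Splitodd10(X[1:-1]+[X[0]+X[-1]])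
-- ===== SOURCE B (Python) =====
-- def Splitodd10(X):
--     # Iterative explicit-stack exploration of the same recombination tree
--     # (the original's `&2 != 1` tests are always true, so a len-2 state with a
--     # multiple of 10 and no odd partner is simply a failing leaf).
--     stack = [list(X)]
--     while stack:
--         s = stack.pop()
--         n = len(s)
--         if n == 1:
--             if s[0] == 10 or s[0] % 2 == 1:
--                 return True
--         elif n == 2:
--             u, v = s[0], s[1]
--             if v % 10 == 0 and u % 2 == 1:
--                 return True
--             if u % 10 == 0 and v % 2 == 1:
--                 return True
--             if v % 10 == 0 or u % 10 == 0:
--                 continue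
--             stack.append([u + v])
--         else:
--             # pushed in reverse so they are popped in the original's order
--             stack.append(s[1:-1] + [s[0] + s[-1]])
--             stack.append([s[0] + s[-1]] + s[1:-1])
--             stack.append([s[0] + s[1]] + s[2:])
--             stack.append(s[:-2] + [s[-1] + s[-2]])
--     return False
-- ===== Notes on version B (the rewrite author's own statement) =====
-- stated objective: alternative
-- what changed: Replaces A's 4-way self-recursion (with Python's or-chaining) by an iterative explicit-stack worklist that pops states, decides the length-1/length-2 leaves directly (dropping the always-true `&2 != 1` tests), and pushes the four recombinations of longer states, returning True as soon as any leaf succeeds.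
import Mathlib
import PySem

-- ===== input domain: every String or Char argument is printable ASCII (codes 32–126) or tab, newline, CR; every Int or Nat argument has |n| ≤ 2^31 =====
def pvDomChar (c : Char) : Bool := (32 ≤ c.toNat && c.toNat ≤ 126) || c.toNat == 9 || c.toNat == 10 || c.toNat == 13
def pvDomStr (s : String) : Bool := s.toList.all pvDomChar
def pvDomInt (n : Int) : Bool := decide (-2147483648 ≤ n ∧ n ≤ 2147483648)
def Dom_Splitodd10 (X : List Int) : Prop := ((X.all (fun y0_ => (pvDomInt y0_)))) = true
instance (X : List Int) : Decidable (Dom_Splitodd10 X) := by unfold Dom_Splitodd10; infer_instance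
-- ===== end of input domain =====

-- B replaces A's 4-way recursion with an explicit worklist (stack) loop over the same
-- recombination states; same values on every nonempty list (objective: alternative).


-- Slice-length and measure facts cited by name in the ports' decreasing_by.
-- (Their proofs are deliberately small hand-written terms.)
theorem pv_len_c1 (X : List Int) : (PySem.List.slice X none (some (-2))).length = X.length - 2 := by
  rw [PySem.List.slice_to_neg_ofNat X 2 (by decide), List.length_take]
  exact Nat.min_eq_left (Nat.sub_le _ _)
theorem pv_len_c2 (X : List Int) : (PySem.List.slice X (some 2) none).length = X.length - 2 := by
  rw [PySem.List.slice_from]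
  · rw [List.length_drop]
    rfl
  · decide
theorem pv_clamp1 (n : Nat) : PySem.List.clampIdx n (1:Int) = min 1 n := by
  rw [PySem.List.clampIdx, if_neg (by decide)]
  rfl
theorem pv_submin (n : Nat) : n - 1 - min 1 n = n - 2 := by
  cases n with
  | zero => rfl
  | succ m =>
    rw [Nat.min_eq_left (Nat.succ_le_succ (Nat.zero_le m))]
    rfl
theorem pv_len_mid (X : List Int) : (PySem.List.slice X (some 1) (some (-1))).length = X.length - 2 := by
  rw [PySem.List.length_slice, PySem.List.clampIdx_neg_one, pv_clamp1]
  exact pv_submin X.length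
theorem pv_two_le (n : Nat) (h1 : ¬n = 1) (h0 : ¬n = 0) : 2 ≤ n :=
  match n, h1, h0 with
  | 0, _, h0 => absurd rfl h0
  | 1, h1, _ => absurd rfl h1
  | m+2, _, _ => Nat.succ_le_succ (Nat.succ_le_succ (Nat.zero_le m))
theorem pv_sub21 (n : Nat) (h : 2 ≤ n) : n - 2 + 1 < n :=
  match n, h with
  | m+2, _ => Nat.lt_succ_self (m+1)
theorem pv_sub12 (n : Nat) (h : 2 ≤ n) : 1 + (n - 2) < n :=
  match n, h with
  | m+2, _ => Nat.add_comm 1 m ▸ Nat.lt_succ_self (m+1)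
theorem pv_decA1 (X : List Int) (y : Int) (h1 : ¬X.length = 1) (h0 : ¬X.length = 0) :
    (PySem.List.slice X none (some (-2)) ++ [y]).length < X.length := by
  rw [List.length_append, pv_len_c1]
  exact pv_sub21 X.length (pv_two_le X.length h1 h0)
theorem pv_decA2 (X : List Int) (y : Int) (h1 : ¬X.length = 1) (h0 : ¬X.length = 0) :
    ([y] ++ PySem.List.slice X (some 2) none).length < X.length := by
  rw [List.length_append, pv_len_c2]
  exact pv_sub12 X.length (pv_two_le X.length h1 h0)
theorem pv_decA3 (X : List Int) (y : Int) (h1 : ¬X.length = 1) (h0 : ¬X.length = 0) :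
    ([y] ++ PySem.List.slice X (some 1) (some (-1))).length < X.length := by
  rw [List.length_append, pv_len_mid]
  exact pv_sub12 X.length (pv_two_le X.length h1 h0)
theorem pv_decA4 (X : List Int) (y : Int) (h1 : ¬X.length = 1) (h0 : ¬X.length = 0) :
    (PySem.List.slice X (some 1) (some (-1)) ++ [y]).length < X.length := by
  rw [List.length_append, pv_len_mid]
  exact pv_sub21 X.length (pv_two_le X.length h1 h0)
theorem pv_decB_rest (s : List Int) (rest : List (List Int)) :
    (rest.map (fun t => 5 ^ t.length)).sum < ((s :: rest).map (fun t => 5 ^ t.length)).sum := by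
  rw [List.map_cons, List.sum_cons]
  exact Nat.lt_add_of_pos_left (Nat.pow_pos (Nat.succ_pos 4))
theorem pv_decB_two (s : List Int) (rest : List (List Int)) (u v : Int) (h2 : s.length = 2) :
    (([u + v] :: rest).map (fun t => 5 ^ t.length)).sum < ((s :: rest).map (fun t => 5 ^ t.length)).sum := by
  rw [List.map_cons, List.sum_cons, List.map_cons, List.sum_cons, List.length_singleton, h2]
  exact Nat.add_lt_add_right (by decide) _
theorem pv_four (a S : Nat) : a + (a + (a + (a + S))) = 4 * a + S := by
  rw [Nat.succ_mul, Nat.succ_mul, Nat.succ_mul, Nat.one_mul, Nat.add_assoc, Nat.add_assoc, Nat.add_assoc]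
theorem pv_three_le (n : Nat) (h1 : ¬n = 1) (h2 : ¬n = 2) (h0 : ¬n = 0) : 3 ≤ n :=
  match n, h1, h2, h0 with
  | 0, _, _, h0 => absurd rfl h0
  | 1, h1, _, _ => absurd rfl h1
  | 2, _, h2, _ => absurd rfl h2
  | m+3, _, _, _ => Nat.succ_le_succ (Nat.succ_le_succ (Nat.succ_le_succ (Nat.zero_le m)))
theorem pv_pow5 (n : Nat) (h : 3 ≤ n) : 4 * 5 ^ (n - 2 + 1) < 5 ^ n := by
  match n, h with
  | m+3, _ =>
    show 4 * 5 ^ (m+2) < 5 ^ (m+3)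
    have hx : (0:Nat) < 5 ^ (m+2) := Nat.pow_pos (Nat.succ_pos 4)
    have h45 : 4 * 5 ^ (m+2) < 5 * 5 ^ (m+2) := (Nat.mul_lt_mul_right hx).mpr (by decide)
    exact Nat.lt_of_lt_of_le h45 (Nat.le_of_eq (Nat.mul_comm 5 (5 ^ (m+2))))
theorem pv_decB_big (s : List Int) (rest : List (List Int)) (y1 y2 y3 y4 : Int)
    (h1 : ¬s.length = 1) (h2 : ¬s.length = 2) (h0 : ¬s.length = 0) :
    (((PySem.List.slice s none (some (-2)) ++ [y1]) ::
      ([y2] ++ PySem.List.slice s (some 2) none) ::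
      ([y3] ++ PySem.List.slice s (some 1) (some (-1))) ::
      (PySem.List.slice s (some 1) (some (-1)) ++ [y4]) :: rest).map (fun t => 5 ^ t.length)).sum <
      ((s :: rest).map (fun t => 5 ^ t.length)).sum := by
  simp only [List.map_cons, List.sum_cons, List.length_append, List.length_singleton,
    pv_len_c1, pv_len_c2, pv_len_mid]
  rw [Nat.add_comm 1 (s.length - 2), pv_four]
  exact Nat.add_lt_add_right (pv_pow5 s.length (pv_three_le s.length h1 h2 h0)) _

-- ===== PORT A =====
-- Literal transliteration of A.  On X = [] Python's recursive branch raises IndexError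
-- (excluded by Pre_); the `if h0 : X.length = 0` guard only totalises the port there.
def Splitodd10 (X : List Int) : Bool :=
  let a := X.length
  if h1 : a = 1 then
    if PySem.List.pyGetD X 0 0 = 10 ∨ PySem.Int.mod (PySem.List.pyGetD X 0 0) 2 = 1 then true
    else false
  else if a = 2 ∧ PySem.Int.mod (PySem.List.pyGetD X (-1) 0) 10 = 0 ∧ PySem.Int.mod (PySem.List.pyGetD X (-2) 0) 2 = 1 then true
  else if a = 2 ∧ PySem.Int.mod (PySem.List.pyGetD X (-2) 0) 10 = 0 ∧ PySem.Int.mod (PySem.List.pyGetD X (-1) 0) 2 = 1 then true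
  else if a = 2 ∧ PySem.Int.mod (PySem.List.pyGetD X (-1) 0) 10 = 0 ∧ PySem.Int.band (PySem.List.pyGetD X (-2) 0) 2 ≠ 1 then false
  else if a = 2 ∧ PySem.Int.mod (PySem.List.pyGetD X (-2) 0) 10 = 0 ∧ PySem.Int.band (PySem.List.pyGetD X (-1) 0) 2 ≠ 1 then false
  else if h0 : a = 0 then false  -- Python raises IndexError here
  else
    Splitodd10 (PySem.List.slice X none (some (-2)) ++ [PySem.List.pyGetD X (-1) 0 + PySem.List.pyGetD X (-2) 0]) ||
    Splitodd10 ([PySem.List.pyGetD X 0 0 + PySem.List.pyGetD X 1 0] ++ PySem.List.slice X (some 2) none) ||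
    Splitodd10 ([PySem.List.pyGetD X 0 0 + PySem.List.pyGetD X (-1) 0] ++ PySem.List.slice X (some 1) (some (-1))) ||
    Splitodd10 (PySem.List.slice X (some 1) (some (-1)) ++ [PySem.List.pyGetD X 0 0 + PySem.List.pyGetD X (-1) 0])
termination_by X.length
decreasing_by
  · exact pv_decA1 X _ h1 h0
  · exact pv_decA2 X _ h1 h0
  · exact pv_decA3 X _ h1 h0
  · exact pv_decA4 X _ h1 h0

-- ===== PORT B =====
-- Worklist loop of Source B: Lean's head-cons stack mirrors the Python list whose top is its
-- last element; children are consed in the order the Python pops them.  The length-0 case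
-- is Python's IndexError on popping [] (reachable only from the excluded input []).
def Splitodd10AltLoop (stack : List (List Int)) : Bool :=
  match stack with
  | [] => false
  | s :: rest =>
    if h1 : s.length = 1 then
      if PySem.List.pyGetD s 0 0 = 10 ∨ PySem.Int.mod (PySem.List.pyGetD s 0 0) 2 = 1 then true
      else Splitodd10AltLoop rest
    else if h2 : s.length = 2 then
      let u := PySem.List.pyGetD s 0 0
      let v := PySem.List.pyGetD s 1 0
      if PySem.Int.mod v 10 = 0 ∧ PySem.Int.mod u 2 = 1 then true
      else if PySem.Int.mod u 10 = 0 ∧ PySem.Int.mod v 2 = 1 then true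
      else if PySem.Int.mod v 10 = 0 ∨ PySem.Int.mod u 10 = 0 then Splitodd10AltLoop rest
      else Splitodd10AltLoop ([u + v] :: rest)
    else if h0 : s.length = 0 then Splitodd10AltLoop rest  -- Python raises IndexError here
    else
      Splitodd10AltLoop
        ((PySem.List.slice s none (some (-2)) ++ [PySem.List.pyGetD s (-1) 0 + PySem.List.pyGetD s (-2) 0]) ::
         ([PySem.List.pyGetD s 0 0 + PySem.List.pyGetD s 1 0] ++ PySem.List.slice s (some 2) none) ::
         ([PySem.List.pyGetD s 0 0 + PySem.List.pyGetD s (-1) 0] ++ PySem.List.slice s (some 1) (some (-1))) ::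
         (PySem.List.slice s (some 1) (some (-1)) ++ [PySem.List.pyGetD s 0 0 + PySem.List.pyGetD s (-1) 0]) :: rest)
termination_by (stack.map (fun s => 5 ^ s.length)).sum
decreasing_by
  · exact pv_decB_rest s rest
  · exact pv_decB_rest s rest
  · exact pv_decB_two s rest u v h2
  · exact pv_decB_rest s rest
  · exact pv_decB_big s rest _ _ _ _ h1 h2 h0

def Splitodd10_alt (X : List Int) : Bool := Splitodd10AltLoop [X]

-- ===== PRECONDITION & SPEC =====
-- Pre_ excludes only the empty list, on which Python A raises IndexError.
def Pre_Splitodd10 (X : List Int) : Prop := X ≠ []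
instance (X : List Int) : Decidable (Pre_Splitodd10 X) := by unfold Pre_Splitodd10; infer_instance
def pvWitness_Splitodd10 : List Int := [3, 7]

def Spec_Splitodd10 (X : List Int) (out : Bool) : Prop := out = Splitodd10_alt X
instance (X : List Int) (out : Bool) : Decidable (Spec_Splitodd10 X out) := by unfold Spec_Splitodd10; infer_instance

-- ===== CLAIM (what is proved, stated in full; the proofs are below) =====
def Claim_equal_Splitodd10 : Prop := ∀ (X : List Int), Dom_Splitodd10 X → Pre_Splitodd10 X → Spec_Splitodd10 X (Splitodd10 X)

-- ===== LEMMAS AND PROOFS =====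

-- Python's x & 2 is never 1, so A's two `... and X[i]&2 != 1` guards reduce to their first conjunct.
theorem and_two_mod_two (n : Nat) : (n &&& 2) % 2 = 0 := by
  have h : (n &&& 2).testBit 0 = false := by
    rw [Nat.testBit_and]; simp
  rw [Nat.testBit_zero] at h
  simp only [decide_eq_false_iff_not] at h
  omega

theorem band_two_ne_one (x : Int) : PySem.Int.band x 2 ≠ 1 := by
  unfold PySem.Int.band
  split_ifs with hx hy hy
  · have := and_two_mod_two x.toNat
    have h3 : ((2:Int).toNat) = 2 := rfl
    rw [h3]; intro hc; omega
  · omega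
  · have h3 : ((2:Int).toNat) = 2 := rfl
    rw [h3]
    have := and_two_mod_two ((-x-1).toNat)
    rw [Nat.and_comm] at this
    have hle : (2:Nat) &&& (-x-1).toNat ≤ 2 := Nat.and_le_left
    intro hc; omega
  · omega

theorem A_len1 (x : Int) :
    Splitodd10 [x] = if x = 10 ∨ PySem.Int.mod x 2 = 1 then true else false := by
  rw [Splitodd10]
  simp [PySem.List.pyGetD]

theorem A_len0 : Splitodd10 [] = false := by
  rw [Splitodd10]; simp

theorem A_len2 (u v : Int) :
    Splitodd10 [u, v] =
      if PySem.Int.mod v 10 = 0 ∧ PySem.Int.mod u 2 = 1 then true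
      else if PySem.Int.mod u 10 = 0 ∧ PySem.Int.mod v 2 = 1 then true
      else if PySem.Int.mod v 10 = 0 ∨ PySem.Int.mod u 10 = 0 then false
      else Splitodd10 [u + v] := by
  rw [Splitodd10]
  have hm : PySem.List.slice [u, v] (some 1) (some (-1)) = ([] : List Int) := by
    simp [PySem.List.slice, PySem.List.clampIdx]
  have hf : PySem.List.slice [u, v] (some 2) none = ([] : List Int) := by
    rw [PySem.List.slice_from] <;> simp
  have hc : v + u = u + v := by ring
  simp [pysem, hm, hf, band_two_ne_one, hc]
  simp [Bool.and_assoc]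

theorem A_big (X : List Int) (h : 3 ≤ X.length) :
    Splitodd10 X =
      (Splitodd10 (PySem.List.slice X none (some (-2)) ++ [PySem.List.pyGetD X (-1) 0 + PySem.List.pyGetD X (-2) 0]) ||
       Splitodd10 ([PySem.List.pyGetD X 0 0 + PySem.List.pyGetD X 1 0] ++ PySem.List.slice X (some 2) none) ||
       Splitodd10 ([PySem.List.pyGetD X 0 0 + PySem.List.pyGetD X (-1) 0] ++ PySem.List.slice X (some 1) (some (-1))) ||
       Splitodd10 (PySem.List.slice X (some 1) (some (-1)) ++ [PySem.List.pyGetD X 0 0 + PySem.List.pyGetD X (-1) 0])) := by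
  rw [Splitodd10]
  have h1 : ¬ X.length = 1 := by omega
  have h2 : ¬ X.length = 2 := by omega
  have h0 : ¬ X.length = 0 := by omega
  simp [h1, h2, h0]

theorem pv_get0 (u v : Int) : PySem.List.pyGetD [u, v] (0:Int) 0 = u := by simp [pysem]
theorem pv_get1 (u v : Int) : PySem.List.pyGetD [u, v] (1:Int) 0 = v := by simp [pysem]

theorem loop_eq_any (L : List (List Int)) : Splitodd10AltLoop L = L.any Splitodd10 := by
  fun_induction Splitodd10AltLoop L
  case case1 => rfl
  case case2 s rest h1 hcond =>
    obtain ⟨x, rfl⟩ : ∃ x, s = [x] := by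
      rcases s with _ | ⟨x, _ | _⟩ <;> simp_all
    simp only [PySem.List.pyGetD_zero_cons] at hcond
    simp only [List.any_cons]
    rw [A_len1, if_pos hcond]
    simp
  case case3 s rest h1 hcond ih =>
    obtain ⟨x, rfl⟩ : ∃ x, s = [x] := by
      rcases s with _ | ⟨x, _ | _⟩ <;> simp_all
    simp only [PySem.List.pyGetD_zero_cons] at hcond
    rw [ih]
    simp only [List.any_cons]
    rw [A_len1, if_neg hcond]
    simp
  case case4 s rest h1 h2 u v hcond =>
    obtain ⟨a, b, rfl⟩ : ∃ a b, s = [a, b] := by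
      rcases s with _ | ⟨a, _ | ⟨b, _ | _⟩⟩ <;> simp_all
    have hu : u = a := pv_get0 a b
    have hv : v = b := pv_get1 a b
    rw [hu, hv] at hcond
    simp only [List.any_cons]
    rw [A_len2, if_pos hcond]
    simp
  case case5 s rest h1 h2 u v hc1 hc2 =>
    obtain ⟨a, b, rfl⟩ : ∃ a b, s = [a, b] := by
      rcases s with _ | ⟨a, _ | ⟨b, _ | _⟩⟩ <;> simp_all
    have hu : u = a := pv_get0 a b
    have hv : v = b := pv_get1 a b
    rw [hu, hv] at hc1 hc2
    simp only [List.any_cons]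
    rw [A_len2, if_neg hc1, if_pos hc2]
    simp
  case case6 s rest h1 h2 u v hc1 hc2 hd ih =>
    obtain ⟨a, b, rfl⟩ : ∃ a b, s = [a, b] := by
      rcases s with _ | ⟨a, _ | ⟨b, _ | _⟩⟩ <;> simp_all
    have hu : u = a := pv_get0 a b
    have hv : v = b := pv_get1 a b
    rw [hu, hv] at hc1 hc2 hd
    rw [ih]
    simp only [List.any_cons]
    rw [A_len2, if_neg hc1, if_neg hc2, if_pos hd]
    simp
  case case7 s rest h1 h2 u v hc1 hc2 hd ih =>
    obtain ⟨a, b, rfl⟩ : ∃ a b, s = [a, b] := by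
      rcases s with _ | ⟨a, _ | ⟨b, _ | _⟩⟩ <;> simp_all
    have hu : u = a := pv_get0 a b
    have hv : v = b := pv_get1 a b
    rw [hu, hv] at hc1 hc2 hd ih ⊢
    rw [ih]
    simp only [List.any_cons]
    rw [A_len2, if_neg hc1, if_neg hc2, if_neg hd]
  case case8 s rest h1 h2 h0 ih =>
    obtain rfl : s = [] := by
      rcases s with _ | ⟨a, _⟩ <;> simp_all
    rw [ih]
    simp [A_len0]
  case case9 s rest h1 h2 h0 ih =>
    rw [ih]
    simp only [List.any_cons]
    rw [A_big s (by omega)]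
    simp [Bool.or_assoc]

-- ===== VERDICT (by name: the statement is the Claim_ definition above) =====
theorem Splitodd10_spec : Claim_equal_Splitodd10 := by
  intro X _ _
  unfold Spec_Splitodd10 Splitodd10_alt
  rw [loop_eq_any]
  simp
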